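-- pv_equiv track=rewrite | github.com/amonty84/Madhav | platform/python-sidecar/pipeline/extractors/msr_extractor.py | _extract_entities
-- ===== SOURCE A (Python) =====
-- from typing import Any
--
-- def _extract_entities(entities: list[Any]) -> tuple[list[str], list[int], list[str]]:
--     """Split entities_involved into planets, houses, and signs lists."""
--     planets: list[str] = []
--     houses: list[int] = []
--     signs: list[str] = []
--
--     for e in entities:
--         if not isinstance(e, str):
--             continue
--         if e.startswith("PLN."):
--             planets.append(e.split(".", 1)[1])
--         elif e.startswith("HSE."):
--             part = e.split(".", 1)[1]
--             if part.isdigit():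
--                 houses.append(int(part))
--         elif e.startswith("SGN."):
--             signs.append(e.split(".", 1)[1])
--
--     return planets, houses, signs
-- ===== SOURCE B (Python) =====
-- def _extract_entities(entities):
--     """Split entities_involved into planets, houses, and signs lists."""
--     planets = [e.split(".", 1)[1] for e in entities
--                if isinstance(e, str) and e.startswith("PLN.")]
--     houses = [int(e.split(".", 1)[1]) for e in entities
--               if isinstance(e, str) and e.startswith("HSE.")
--               and e.split(".", 1)[1].isdigit()]
--     signs = [e.split(".", 1)[1] for e in entities
--              if isinstance(e, str) and e.startswith("SGN.")]
--     return planets, houses, signs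
-- ===== Notes on version B (the rewrite author's own statement) =====
-- stated objective: idiomatic
-- what changed: Replaces the single accumulating for-loop with three independent filtered list comprehensions over the input, one per prefix, keeping the isdigit guard on house numbers.
import Mathlib
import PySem

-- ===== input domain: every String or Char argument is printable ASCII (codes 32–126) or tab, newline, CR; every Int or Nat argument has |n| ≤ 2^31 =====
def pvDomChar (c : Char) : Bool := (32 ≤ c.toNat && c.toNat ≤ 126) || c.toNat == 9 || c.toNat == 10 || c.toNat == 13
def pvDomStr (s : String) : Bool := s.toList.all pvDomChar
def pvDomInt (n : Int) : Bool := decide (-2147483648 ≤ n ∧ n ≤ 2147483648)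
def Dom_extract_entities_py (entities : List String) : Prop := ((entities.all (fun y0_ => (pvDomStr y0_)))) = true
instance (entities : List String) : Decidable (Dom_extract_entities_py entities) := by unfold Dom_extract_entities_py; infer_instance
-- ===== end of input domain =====

-- B replaces A's single accumulating loop by three independent filtered comprehensions
-- (one scan per prefix); same return value, objective: idiomatic decomposition.

-- ===== PORT A =====
-- e.split(".", 1)[1]; both Pythons only evaluate it after e.startswith(<prefix ending in '.'>),
-- so the split always yields two parts and the [1] index is in range (getD "" is never taken).
def pvSplitTail (e : String) : String :=
  (PySem.List.pyGet? ((PySem.Str.splitMax? e "." 1).getD []) 1).getD ""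

-- the for-loop of A, appending to the three accumulators in order
def pvLoopA (planets : List String) (houses : List Int) (signs : List String) :
    List String → List String × List Int × List String
  | [] => (planets, houses, signs)
  | e :: rest =>
    if PySem.Str.startswith e "PLN." then
      pvLoopA (planets ++ [pvSplitTail e]) houses signs rest
    else if PySem.Str.startswith e "HSE." then
      let part := pvSplitTail e
      if PySem.Str.strIsdigit part then
        -- int(part): part.isdigit() holds, so int() succeeds (getD 0 never taken)
        pvLoopA planets (houses ++ [(PySem.Int.ofStr? part).getD 0]) signs rest
      else pvLoopA planets houses signs rest
    else if PySem.Str.startswith e "SGN." then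
      pvLoopA planets houses (signs ++ [pvSplitTail e]) rest
    else pvLoopA planets houses signs rest

def extract_entities_py (entities : List String) : List String × List Int × List String :=
  pvLoopA [] [] [] entities

-- ===== PORT B =====
def extract_entities_py_alt (entities : List String) : List String × List Int × List String :=
  ((entities.filter (fun e => PySem.Str.startswith e "PLN.")).map pvSplitTail,
   (entities.filter (fun e =>
      PySem.Str.startswith e "HSE." && PySem.Str.strIsdigit (pvSplitTail e))).map
        (fun e => (PySem.Int.ofStr? (pvSplitTail e)).getD 0),
   (entities.filter (fun e => PySem.Str.startswith e "SGN.")).map pvSplitTail)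

-- ===== PRECONDITION & SPEC =====
def Spec_extract_entities_py (entities : List String) (out : List String × List Int × List String) : Prop := out = extract_entities_py_alt entities
instance (entities : List String) (out : List String × List Int × List String) : Decidable (Spec_extract_entities_py entities out) := by unfold Spec_extract_entities_py; infer_instance

-- ===== CLAIM (what is proved, stated in full; the proofs are below) =====
def Claim_equal_extract_entities_py : Prop := ∀ (entities : List String), Dom_extract_entities_py entities → Spec_extract_entities_py entities (extract_entities_py entities)

-- ===== LEMMAS AND PROOFS =====

-- loop invariant: A's loop from any accumulators appends exactly B's three comprehensions
theorem pvLoopA_eq (l : List String) :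
    ∀ (p : List String) (h : List Int) (s : List String),
    pvLoopA p h s l =
      (p ++ (l.filter (fun e => PySem.Str.startswith e "PLN.")).map pvSplitTail,
       h ++ (l.filter (fun e =>
          PySem.Str.startswith e "HSE." && PySem.Str.strIsdigit (pvSplitTail e))).map
            (fun e => (PySem.Int.ofStr? (pvSplitTail e)).getD 0),
       s ++ (l.filter (fun e => PySem.Str.startswith e "SGN.")).map pvSplitTail) := by
  induction l with
  | nil => intro p h s; simp [pvLoopA]
  | cons e rest ih =>
    intro p h s
    simp only [PySem.Str.startswith_eq, PySem.Str.strIsdigit_eq] at ih ⊢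
    by_cases hp : PySem.Chars.startswith e.toList ['P', 'L', 'N', '.'] = true
    · -- the three prefixes are mutually exclusive
      have hh : PySem.Chars.startswith e.toList ['H', 'S', 'E', '.'] = false := by
        rw [Bool.eq_false_iff]; intro hc
        rw [PySem.Chars.startswith_iff] at hp hc
        rcases hp with ⟨t1, ht1⟩; rcases hc with ⟨t2, ht2⟩
        exact absurd (ht1.trans ht2.symm) (by simp)
      have hs : PySem.Chars.startswith e.toList ['S', 'G', 'N', '.'] = false := by
        rw [Bool.eq_false_iff]; intro hc
        rw [PySem.Chars.startswith_iff] at hp hc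
        rcases hp with ⟨t1, ht1⟩; rcases hc with ⟨t2, ht2⟩
        exact absurd (ht1.trans ht2.symm) (by simp)
      simp [pvLoopA, hp, hh, hs, ih]
    · by_cases hh : PySem.Chars.startswith e.toList ['H', 'S', 'E', '.'] = true
      · have hs : PySem.Chars.startswith e.toList ['S', 'G', 'N', '.'] = false := by
          rw [Bool.eq_false_iff]; intro hc
          rw [PySem.Chars.startswith_iff] at hh hc
          rcases hh with ⟨t1, ht1⟩; rcases hc with ⟨t2, ht2⟩
          exact absurd (ht1.trans ht2.symm) (by simp)
        by_cases hd : PySem.Chars.strIsdigit (pvSplitTail e).toList = true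
        · simp [pvLoopA, hp, hh, hs, hd, ih]
        · simp [pvLoopA, hp, hh, hs, hd, ih]
      · by_cases hs : PySem.Chars.startswith e.toList ['S', 'G', 'N', '.'] = true
        · simp [pvLoopA, hp, hh, hs, ih]
        · simp [pvLoopA, hp, hh, hs, ih]

-- ===== VERDICT (by name: the statement is the Claim_ definition above) =====
theorem extract_entities_py_spec : Claim_equal_extract_entities_py := by
  intro entities _
  unfold Spec_extract_entities_py extract_entities_py extract_entities_py_alt
  simp [pvLoopA_eq]
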